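-- pv_equiv track=rewrite | github.com/ColeStrickler/EECS750-FinalProject | gadget_scans/gadget_stats.py | device_driver_stats
-- ===== SOURCE A (Python) =====
-- def device_driver_stats(gadgets):
--     driver = 0
--     bluetooth = 0
--     sound = 0
--     net = 0
--     other = 0
--     result = []
--     for f in gadgets.keys():
--         num = len(gadgets[f])
--         if "drivers" in f:
--             driver += num
--         elif "bluetooth" in f:
--             bluetooth += num
--         elif "sound" in f:
--             sound += num
--         elif "net" in f:
--             net += num
--         else:
--             other += num
--             result.append(f)
--     return result, {"driver":driver,"bluetooth":bluetooth,"sound":sound,"net":net,"other":other}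
-- ===== SOURCE B (Python) =====
-- CATS = [("drivers", "driver"), ("bluetooth", "bluetooth"), ("sound", "sound"), ("net", "net")]
--
--
-- def device_driver_stats(gadgets):
--     # staged sieve: one pass per category over the not-yet-classified remainder
--     rem = list(gadgets.items())
--     counts = {}
--     for sub, key in CATS:
--         counts[key] = sum(len(g) for f, g in rem if sub in f)
--         rem = [(f, g) for f, g in rem if sub not in f]
--     counts["other"] = sum(len(g) for f, g in rem)
--     return [f for f, g in rem], counts
-- ===== Notes on version B (the rewrite author's own statement) =====
-- stated objective: alternative
-- what changed: Replaces A's single pass with five scalar counters and an elif chain by a staged sieve: for each category in order, one filtering pass sums the matching files' gadget counts and removes them from the remainder, so the 'other' list is just what survives all sieves.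
import Mathlib
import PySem

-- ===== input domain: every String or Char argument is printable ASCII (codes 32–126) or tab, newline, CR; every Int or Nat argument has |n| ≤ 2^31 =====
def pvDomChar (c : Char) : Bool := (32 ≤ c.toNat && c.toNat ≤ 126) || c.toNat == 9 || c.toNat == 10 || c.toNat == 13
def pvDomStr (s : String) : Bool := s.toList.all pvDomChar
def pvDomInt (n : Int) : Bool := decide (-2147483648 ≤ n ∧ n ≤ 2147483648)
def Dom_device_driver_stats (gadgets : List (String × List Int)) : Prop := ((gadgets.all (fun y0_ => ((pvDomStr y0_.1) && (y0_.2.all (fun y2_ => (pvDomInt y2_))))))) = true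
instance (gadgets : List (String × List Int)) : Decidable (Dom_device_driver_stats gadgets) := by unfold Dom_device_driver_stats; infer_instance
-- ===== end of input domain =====

-- ===== PORT A =====
-- B replaces A's single counting pass (five scalar counters, elif chain) by a staged sieve:
-- one filtering pass per category over the remainder; alternative decomposition, same cost.
def device_driver_stats (gadgets : List (String × List Int)) : List String × (List (String × Int)) :=
  let st := gadgets.foldl
    (fun (st : Int × Int × Int × Int × Int × List String) p =>
      let (driver, bluetooth, sound, net, other, result) := st
      let num : Int := (p.2.length : Int)
      if PySem.Str.isIn "drivers" p.1 then (driver + num, bluetooth, sound, net, other, result)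
      else if PySem.Str.isIn "bluetooth" p.1 then (driver, bluetooth + num, sound, net, other, result)
      else if PySem.Str.isIn "sound" p.1 then (driver, bluetooth, sound + num, net, other, result)
      else if PySem.Str.isIn "net" p.1 then (driver, bluetooth, sound, net + num, other, result)
      else (driver, bluetooth, sound, net, other + num, result ++ [p.1]))
    ((0 : Int), (0 : Int), (0 : Int), (0 : Int), (0 : Int), ([] : List String))
  (st.2.2.2.2.2,
   [("driver", st.1), ("bluetooth", st.2.1), ("sound", st.2.2.1),
    ("net", st.2.2.2.1), ("other", st.2.2.2.2.1)])

-- ===== PORT B =====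
def pvCATS : List (String × String) :=
  [("drivers", "driver"), ("bluetooth", "bluetooth"), ("sound", "sound"), ("net", "net")]

def device_driver_stats_alt (gadgets : List (String × List Int)) : List String × (List (String × Int)) :=
  -- for sub, key in CATS: counts[key] = sum(len(g) for f,g in rem if sub in f); rem = [.. if sub not in f]
  let st := pvCATS.foldl
    (fun (st : List (String × List Int) × PySem.Dict String Int) c =>
      let counts := st.2.insert c.2
        ((st.1.filter (fun p => PySem.Str.isIn c.1 p.1)).foldl
          (fun a p => a + (p.2.length : Int)) 0)
      let rem := st.1.filter (fun p => !PySem.Str.isIn c.1 p.1)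
      (rem, counts))
    (gadgets, PySem.Dict.mk [])
  let counts := st.2.insert "other"
    (st.1.foldl (fun a p => a + (p.2.length : Int)) 0)
  (st.1.map (·.1), counts.items)

-- ===== PRECONDITION & SPEC =====
def Spec_device_driver_stats (gadgets : List (String × List Int)) (out : List String × (List (String × Int))) : Prop := out = device_driver_stats_alt gadgets
instance (gadgets : List (String × List Int)) (out : List String × (List (String × Int))) : Decidable (Spec_device_driver_stats gadgets out) := by unfold Spec_device_driver_stats; infer_instance

-- ===== CLAIM (what is proved, stated in full; the proofs are below) =====
def Claim_equal_device_driver_stats : Prop := ∀ (gadgets : List (String × List Int)), Dom_device_driver_stats gadgets → Spec_device_driver_stats gadgets (device_driver_stats gadgets)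

-- ===== LEMMAS AND PROOFS =====

def pvSumLen (l : List (String × List Int)) : Int :=
  l.foldl (fun a p => a + (p.2.length : Int)) 0

theorem pvSumLen_shift (l : List (String × List Int)) (a : Int) :
    l.foldl (fun a p => a + (p.2.length : Int)) a = a + pvSumLen l := by
  induction l generalizing a with
  | nil => simp [pvSumLen]
  | cons x l ih =>
      simp only [List.foldl_cons, ih]
      conv_rhs => rw [pvSumLen, List.foldl_cons, ih]
      ring

theorem pvSumLen_cons (x : String × List Int) (l : List (String × List Int)) :
    pvSumLen (x :: l) = (x.2.length : Int) + pvSumLen l := by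
  rw [pvSumLen, List.foldl_cons, pvSumLen_shift]; ring

-- A's one-pass fold, characterized by B's staged filters
theorem pvA_char (gs : List (String × List Int)) :
    ∀ (d b s n o : Int) (res : List String),
      gs.foldl
        (fun (st : Int × Int × Int × Int × Int × List String) p =>
          let (driver, bluetooth, sound, net, other, result) := st
          let num : Int := (p.2.length : Int)
          if PySem.Str.isIn "drivers" p.1 then (driver + num, bluetooth, sound, net, other, result)
          else if PySem.Str.isIn "bluetooth" p.1 then (driver, bluetooth + num, sound, net, other, result)
          else if PySem.Str.isIn "sound" p.1 then (driver, bluetooth, sound + num, net, other, result)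
          else if PySem.Str.isIn "net" p.1 then (driver, bluetooth, sound, net + num, other, result)
          else (driver, bluetooth, sound, net, other + num, result ++ [p.1]))
        (d, b, s, n, o, res)
      = (d + pvSumLen (gs.filter (fun p => PySem.Str.isIn "drivers" p.1)),
         b + pvSumLen ((gs.filter (fun p => !PySem.Str.isIn "drivers" p.1)).filter (fun p => PySem.Str.isIn "bluetooth" p.1)),
         s + pvSumLen (((gs.filter (fun p => !PySem.Str.isIn "drivers" p.1)).filter (fun p => !PySem.Str.isIn "bluetooth" p.1)).filter (fun p => PySem.Str.isIn "sound" p.1)),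
         n + pvSumLen ((((gs.filter (fun p => !PySem.Str.isIn "drivers" p.1)).filter (fun p => !PySem.Str.isIn "bluetooth" p.1)).filter (fun p => !PySem.Str.isIn "sound" p.1)).filter (fun p => PySem.Str.isIn "net" p.1)),
         o + pvSumLen ((((gs.filter (fun p => !PySem.Str.isIn "drivers" p.1)).filter (fun p => !PySem.Str.isIn "bluetooth" p.1)).filter (fun p => !PySem.Str.isIn "sound" p.1)).filter (fun p => !PySem.Str.isIn "net" p.1)),
         res ++ ((((gs.filter (fun p => !PySem.Str.isIn "drivers" p.1)).filter (fun p => !PySem.Str.isIn "bluetooth" p.1)).filter (fun p => !PySem.Str.isIn "sound" p.1)).filter (fun p => !PySem.Str.isIn "net" p.1)).map (·.1)) := by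
  induction gs with
  | nil => intro d b s n o res; simp [pvSumLen]
  | cons p gs ih =>
      intro d b s n o res
      simp only [List.foldl_cons]
      cases h1 : PySem.Str.isIn "drivers" p.1 with
      | true =>
          simp only [List.filter_cons, h1, Bool.not_true,
            Bool.false_eq_true, if_true, if_false, ih, pvSumLen_cons, Prod.mk.injEq]
          and_intros <;> first | ring | simp
      | false =>
          cases h2 : PySem.Str.isIn "bluetooth" p.1 with
          | true =>
              simp only [List.filter_cons, h1, h2, Bool.not_true, Bool.not_false,
                Bool.false_eq_true, if_true, if_false, ih, pvSumLen_cons, Prod.mk.injEq]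
              and_intros <;> first | ring | simp
          | false =>
              cases h3 : PySem.Str.isIn "sound" p.1 with
              | true =>
                  simp only [List.filter_cons, h1, h2, h3, Bool.not_true, Bool.not_false,
                    Bool.false_eq_true, if_true, if_false, ih, pvSumLen_cons, Prod.mk.injEq]
                  and_intros <;> first | ring | simp
              | false =>
                  cases h4 : PySem.Str.isIn "net" p.1 with
                  | true =>
                      simp only [List.filter_cons, h1, h2, h3, h4, Bool.not_true, Bool.not_false,
                        Bool.false_eq_true, if_true, if_false, ih, pvSumLen_cons, Prod.mk.injEq]
                      and_intros <;> first | ring | simp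
                  | false =>
                      simp only [List.filter_cons, h1, h2, h3, h4, Bool.not_false,
                        Bool.false_eq_true, if_true, if_false, ih, pvSumLen_cons, List.map_cons,
                        Prod.mk.injEq]
                      and_intros <;> first | ring | simp

-- B's staged sieve, unrolled over the four fixed categories
theorem pvB_char (gs : List (String × List Int)) :
    device_driver_stats_alt gs
      = (((((gs.filter (fun p => !PySem.Str.isIn "drivers" p.1)).filter (fun p => !PySem.Str.isIn "bluetooth" p.1)).filter (fun p => !PySem.Str.isIn "sound" p.1)).filter (fun p => !PySem.Str.isIn "net" p.1)).map (·.1),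
         [("driver", pvSumLen (gs.filter (fun p => PySem.Str.isIn "drivers" p.1))),
          ("bluetooth", pvSumLen ((gs.filter (fun p => !PySem.Str.isIn "drivers" p.1)).filter (fun p => PySem.Str.isIn "bluetooth" p.1))),
          ("sound", pvSumLen (((gs.filter (fun p => !PySem.Str.isIn "drivers" p.1)).filter (fun p => !PySem.Str.isIn "bluetooth" p.1)).filter (fun p => PySem.Str.isIn "sound" p.1))),
          ("net", pvSumLen ((((gs.filter (fun p => !PySem.Str.isIn "drivers" p.1)).filter (fun p => !PySem.Str.isIn "bluetooth" p.1)).filter (fun p => !PySem.Str.isIn "sound" p.1)).filter (fun p => PySem.Str.isIn "net" p.1))),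
          ("other", pvSumLen ((((gs.filter (fun p => !PySem.Str.isIn "drivers" p.1)).filter (fun p => !PySem.Str.isIn "bluetooth" p.1)).filter (fun p => !PySem.Str.isIn "sound" p.1)).filter (fun p => !PySem.Str.isIn "net" p.1)))]) := by
  simp only [device_driver_stats_alt, pvCATS, List.foldl_cons, List.foldl_nil, pvSumLen]
  rfl

-- ===== VERDICT (by name: the statement is the Claim_ definition above) =====
theorem device_driver_stats_spec : Claim_equal_device_driver_stats := by
  intro gadgets _
  show device_driver_stats gadgets = device_driver_stats_alt gadgets
  rw [pvB_char]
  simp only [device_driver_stats, pvA_char, zero_add, List.nil_append]
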